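-- pv_equiv track=rewrite | github.com/Someshsw1109/Infosys-Sp-and-Dse-Prep | Greedy Algorithm/Other Greedy Algo Questions (Leetcode and codeforces)/Codeforces/1210c Maximum Medians.py | Solve
-- ===== SOURCE A (Python) =====
-- def Solve(n, k, arr):
--     # Sort the array
--     arr.sort()
--     low = arr[n // 2]
--     high = low + k
--     res = low
--     # Binary Search on Median Value
--     while low <= high:
--         mid = (low + high) // 2
--         OperationsNeeded = 0
--         # Calculate required operations from Median (n // 2) to end (n)
--         for i in range(n // 2, n):
--             if arr[i] < mid:
--                 OperationsNeeded += mid - arr[i]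
--         # if total operations <= k then we found our answer
--         if OperationsNeeded <= k:
--             res = mid
--             low = mid + 1
--         else:
--             high = mid - 1
--     return res
-- ===== SOURCE B (Python) =====
-- def Solve(n, k, arr):
--     a = sorted(arr)
--     m = n // 2
--     # prefix sums: pref[i] = sum of the first i elements of a
--     pref = [0]
--     for x in a:
--         pref.append(pref[-1] + x)
--
--     def cost(v):
--         # first index in [m, n) whose element is >= v (hand-rolled bisect_left)
--         lo, hi = m, n
--         while lo < hi:
--             mid = (lo + hi) // 2
--             if a[mid] < v:
--                 lo = mid + 1
--             else:
--                 hi = mid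
--         # all of a[m:lo] must be raised to v
--         return v * (lo - m) - (pref[lo] - pref[m])
--
--     lo, hi = a[m], a[m] + k
--     while lo < hi:
--         mid = (lo + hi + 1) // 2
--         if cost(mid) <= k:
--             lo = mid
--         else:
--             hi = mid - 1
--     return lo
-- ===== Notes on version B (the rewrite author's own statement) =====
-- stated objective: alternative
-- what changed: Each candidate median is evaluated by binary-searching the boundary index in the sorted suffix and reading the raise cost off a precomputed prefix-sum array, instead of A's full rescan of the suffix for every candidate; the outer search is a lo<hi upper-biased binary search instead of A's low<=high res-tracking one.
import Mathlib
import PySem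

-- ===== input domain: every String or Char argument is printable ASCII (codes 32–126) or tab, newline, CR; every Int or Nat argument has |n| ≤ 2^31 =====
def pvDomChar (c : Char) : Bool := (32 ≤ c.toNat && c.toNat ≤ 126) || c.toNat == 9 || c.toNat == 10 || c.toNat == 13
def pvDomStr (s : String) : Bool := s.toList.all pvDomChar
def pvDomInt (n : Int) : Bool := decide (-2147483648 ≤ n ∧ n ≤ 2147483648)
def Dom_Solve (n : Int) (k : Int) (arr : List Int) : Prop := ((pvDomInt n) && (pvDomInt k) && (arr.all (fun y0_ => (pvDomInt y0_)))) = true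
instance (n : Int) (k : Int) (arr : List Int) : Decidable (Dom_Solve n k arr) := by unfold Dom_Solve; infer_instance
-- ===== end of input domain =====

-- B evaluates each candidate median by binary-searching the boundary index in the sorted suffix
-- and reading the cost off a prefix-sum array, instead of A's rescan of the suffix per candidate.
-- Note: Python A sorts arr IN PLACE (a caller-visible mutation); B sorts a copy — the
-- equivalence proved here is about the RETURN value only.

-- termination lemmas for the while-loop ports (cited by name in decreasing_by;
-- proofs are hand-written small terms)
theorem SolveLoop_dec1 (low high : Int) (h : low ≤ high) :
    (high + 1 - (PySem.Int.floordiv (low + high) 2 + 1)).toNat < (high + 1 - low).toNat := by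
  have M := PySem.Int.floordiv_two_mid_bounds h
  have hb : 0 < high + 1 - low := Int.sub_pos.mpr (Int.lt_add_one_iff.mpr h)
  exact (Int.toNat_lt_toNat hb).mpr (sub_lt_sub_left (Int.lt_add_one_iff.mpr M.1) (high + 1))

theorem SolveLoop_dec2 (low high : Int) (h : low ≤ high) :
    (PySem.Int.floordiv (low + high) 2 - 1 + 1 - low).toNat < (high + 1 - low).toNat := by
  have M := PySem.Int.floordiv_two_mid_bounds h
  have hb : 0 < high + 1 - low := Int.sub_pos.mpr (Int.lt_add_one_iff.mpr h)
  rw [sub_add_cancel]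
  exact (Int.toNat_lt_toNat hb).mpr (sub_lt_sub_right (lt_of_le_of_lt M.2 (lt_add_one high)) low)

theorem SolveBisect_dec1 (lo hi : Int) (h : lo < hi) :
    (hi - (PySem.Int.floordiv (lo + hi) 2 + 1)).toNat < (hi - lo).toNat := by
  have M := PySem.Int.floordiv_two_mid_bounds (le_of_lt h)
  have hb : 0 < hi - lo := Int.sub_pos.mpr h
  exact (Int.toNat_lt_toNat hb).mpr (sub_lt_sub_left (Int.lt_add_one_iff.mpr M.1) hi)

theorem SolveBisect_dec2 (lo hi : Int) (h : lo < hi) :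
    (PySem.Int.floordiv (lo + hi) 2 - lo).toNat < (hi - lo).toNat := by
  have hb : 0 < hi - lo := Int.sub_pos.mpr h
  have h2 : PySem.Int.floordiv (lo + hi) 2 < hi := by
    refine (PySem.Int.floordiv_lt_iff_lt_mul two_pos).mpr ?_
    rw [mul_two]
    exact add_lt_add_of_lt_of_le h (le_refl hi)
  exact (Int.toNat_lt_toNat hb).mpr (sub_lt_sub_right h2 lo)

theorem SolveLoopB_dec1 (lo hi : Int) (h : lo < hi) :
    (hi - PySem.Int.floordiv (lo + hi + 1) 2).toNat < (hi - lo).toNat := by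
  have hb : 0 < hi - lo := Int.sub_pos.mpr h
  have h2 : lo + 1 ≤ PySem.Int.floordiv (lo + hi + 1) 2 := by
    refine (PySem.Int.le_floordiv_iff_mul_le two_pos).mpr ?_
    calc (lo + 1) * 2 = (lo + 1) + (lo + 1) := mul_two _
      _ ≤ (lo + 1) + hi := add_le_add (le_refl (lo + 1)) (Int.add_one_le_iff.mpr h)
      _ = lo + (1 + hi) := add_assoc lo 1 hi
      _ = lo + (hi + 1) := by rw [add_comm 1 hi]
      _ = lo + hi + 1 := (add_assoc lo hi 1).symm
  exact (Int.toNat_lt_toNat hb).mpr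
    (sub_lt_sub_left (lt_of_lt_of_le (lt_add_one lo) h2) hi)

theorem SolveLoopB_dec2 (lo hi : Int) (h : lo < hi) :
    (PySem.Int.floordiv (lo + hi + 1) 2 - 1 - lo).toNat < (hi - lo).toNat := by
  have hb : 0 < hi - lo := Int.sub_pos.mpr h
  have h2 : PySem.Int.floordiv (lo + hi + 1) 2 < hi + 1 := by
    refine (PySem.Int.floordiv_lt_iff_lt_mul two_pos).mpr ?_
    calc lo + hi + 1 = lo + (hi + 1) := add_assoc lo hi 1
      _ < (hi + 1) + (hi + 1) :=
        add_lt_add_of_lt_of_le (Int.lt_add_one_iff.mpr (le_of_lt h)) (le_refl (hi + 1))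
      _ = (hi + 1) * 2 := (mul_two (hi + 1)).symm
  exact (Int.toNat_lt_toNat hb).mpr
    (sub_lt_sub_right (Int.sub_one_lt_iff.mpr (Int.lt_add_one_iff.mp h2)) lo)

-- ===== PORT A =====
-- operations needed to raise every element of arr[n//2:n] below mid up to mid (A's inner for-loop)
def SolveCost (a : List Int) (m n mid : Int) : Int :=
  (PySem.List.pyRange m n 1).foldl
    (fun ops i =>
      if PySem.List.pyGetD a i 0 < mid then ops + (mid - PySem.List.pyGetD a i 0) else ops) 0

-- A's while-loop: binary search on the median value, tracking res
def SolveLoop (a : List Int) (m n k : Int) (low high res : Int) : Int :=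
  if h : low ≤ high then
    let mid := PySem.Int.floordiv (low + high) 2
    if SolveCost a m n mid ≤ k then
      SolveLoop a m n k (mid + 1) high mid
    else
      SolveLoop a m n k low (mid - 1) res
  else res
termination_by (high + 1 - low).toNat
decreasing_by
  · exact SolveLoop_dec1 low high h
  · exact SolveLoop_dec2 low high h

def Solve (n : Int) (k : Int) (arr : List Int) : Int :=
  let a := PySem.List.sorted arr (fun x => x) false
  let low := PySem.List.pyGetD a (PySem.Int.floordiv n 2) 0
  SolveLoop a (PySem.Int.floordiv n 2) n k low (low + k) low

-- ===== PORT B =====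
-- Source B's inner while-loop: first index in [lo, hi) whose element is ≥ v
def SolveBisect (a : List Int) (v : Int) (lo hi : Int) : Int :=
  if h : lo < hi then
    let mid := PySem.Int.floordiv (lo + hi) 2
    if PySem.List.pyGetD a mid 0 < v then SolveBisect a v (mid + 1) hi
    else SolveBisect a v lo mid
  else lo
termination_by (hi - lo).toNat
decreasing_by
  · exact SolveBisect_dec1 lo hi h
  · exact SolveBisect_dec2 lo hi h

-- Source B's cost: raise all of a[m:j] (the elements < v in the sorted suffix) up to v, via prefix sums
def SolveCostB (a pref : List Int) (m n v : Int) : Int :=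
  let j := SolveBisect a v m n
  v * (j - m) - (PySem.List.pyGetD pref j 0 - PySem.List.pyGetD pref m 0)

-- Source B's outer while-loop (lo < hi, upper-biased midpoint)
def SolveLoopB (a pref : List Int) (m n k : Int) (lo hi : Int) : Int :=
  if h : lo < hi then
    let mid := PySem.Int.floordiv (lo + hi + 1) 2
    if SolveCostB a pref m n mid ≤ k then SolveLoopB a pref m n k mid hi
    else SolveLoopB a pref m n k lo (mid - 1)
  else lo
termination_by (hi - lo).toNat
decreasing_by
  · exact SolveLoopB_dec1 lo hi h
  · exact SolveLoopB_dec2 lo hi h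

def Solve_alt (n : Int) (k : Int) (arr : List Int) : Int :=
  let a := PySem.List.sorted arr (fun x => x) false
  let m := PySem.Int.floordiv n 2
  let pref := a.foldl (fun p x => p ++ [PySem.List.pyGetD p (-1) 0 + x]) [0]
  let lo := PySem.List.pyGetD a m 0
  SolveLoopB a pref m n k lo (lo + k)

-- ===== PRECONDITION & SPEC =====
-- Pre_ is exactly where Python A returns: arr[n//2] must be a valid (possibly negative) index,
-- and when k ≥ 0 the loop scans arr[i] for i in range(n//2, n), so n ≤ len(arr) (else IndexError).
def Pre_Solve (n : Int) (k : Int) (arr : List Int) : Prop :=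
  -(arr.length : Int) ≤ PySem.Int.floordiv n 2 ∧
  PySem.Int.floordiv n 2 < (arr.length : Int) ∧
  (k < 0 ∨ n ≤ (arr.length : Int))
instance (n : Int) (k : Int) (arr : List Int) : Decidable (Pre_Solve n k arr) := by
  unfold Pre_Solve; infer_instance

def pvWitness_Solve : Int × Int × List Int := (5, 4, [1, 7, 3, 2, 9])

def Spec_Solve (n : Int) (k : Int) (arr : List Int) (out : Int) : Prop := out = Solve_alt n k arr
instance (n : Int) (k : Int) (arr : List Int) (out : Int) : Decidable (Spec_Solve n k arr out) := by
  unfold Spec_Solve; infer_instance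

-- ===== CLAIM (what is proved, stated in full; the proofs are below) =====
def Claim_equal_Solve : Prop := ∀ (n : Int) (k : Int) (arr : List Int), Dom_Solve n k arr → Pre_Solve n k arr → Spec_Solve n k arr (Solve n k arr)

-- ===== LEMMAS AND PROOFS =====

-- fold of A's inner loop as a sum
theorem foldl_ite_add (f : Int → Int) (p : Int → Prop) [DecidablePred p] :
    ∀ (l : List Int) (init : Int),
      l.foldl (fun ops i => if p i then ops + f i else ops) init
        = init + (l.map (fun i => if p i then f i else 0)).sum := by
  intro l
  induction l with
  | nil => intro init; simp
  | cons x xs ih =>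
    intro init
    simp only [List.foldl_cons, List.map_cons, List.sum_cons, ih]
    split_ifs <;> ring

theorem SolveCost_eq_sum (a : List Int) (m n v : Int) :
    SolveCost a m n v
      = ((PySem.List.pyRange m n 1).map
          (fun i => if PySem.List.pyGetD a i 0 < v then v - PySem.List.pyGetD a i 0 else 0)).sum := by
  unfold SolveCost
  rw [foldl_ite_add (fun i => v - PySem.List.pyGetD a i 0) (fun i => PySem.List.pyGetD a i 0 < v)]
  ring

theorem SolveCost_mono (a : List Int) (m n v w : Int) (hvw : v ≤ w) :
    SolveCost a m n v ≤ SolveCost a m n w := by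
  rw [SolveCost_eq_sum, SolveCost_eq_sum]
  apply List.sum_le_sum
  intro i _
  split_ifs <;> omega

-- elements of a sorted list are monotone in the (nonnegative) index
theorem sorted_pyGetD_mono (a : List Int) (hs : a.Pairwise (· ≤ ·)) (i j : Int)
    (h0 : 0 ≤ i) (hij : i ≤ j) (hj : j < (a.length : Int)) :
    PySem.List.pyGetD a i 0 ≤ PySem.List.pyGetD a j 0 := by
  rw [PySem.List.pyGetD_eq_getElem a 0 h0 (by omega),
      PySem.List.pyGetD_eq_getElem a 0 (by omega) hj]
  rcases eq_or_lt_of_le hij with h | h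
  · subst h; exact le_refl _
  · exact (List.pairwise_iff_getElem.mp hs) i.toNat j.toNat (by omega) (by omega) (by omega)

-- Source B's hand-rolled bisect_left: boundary specification
theorem SolveBisect_spec (a : List Int) (v : Int) (hs : a.Pairwise (· ≤ ·)) :
    ∀ (lo hi : Int), 0 ≤ lo → lo ≤ hi → hi ≤ (a.length : Int) →
      lo ≤ SolveBisect a v lo hi ∧ SolveBisect a v lo hi ≤ hi ∧
      (∀ i : Int, lo ≤ i → i < SolveBisect a v lo hi → PySem.List.pyGetD a i 0 < v) ∧
      (∀ i : Int, SolveBisect a v lo hi ≤ i → i < hi → ¬ PySem.List.pyGetD a i 0 < v) := by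
  intro lo hi
  fun_induction SolveBisect a v lo hi with
  | case1 lo hi h mid hmidlt ih =>
    intro h0 _ hhi
    have hb := PySem.Int.floordiv_two_mid_bounds (le_of_lt h)
    have hmh : PySem.Int.floordiv (lo + hi) 2 < hi :=
      (PySem.Int.floordiv_lt_iff_lt_mul (by omega)).mpr (by omega)
    obtain ⟨i1, i2, i3, i4⟩ := ih (by omega) (by omega) hhi
    refine ⟨by omega, by omega, ?_, i4⟩
    intro i hi1 hi2
    by_cases hc : i ≤ mid
    · exact lt_of_le_of_lt (sorted_pyGetD_mono a hs i mid (by omega) hc (by omega)) hmidlt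
    · exact i3 i (by omega) hi2
  | case2 lo hi h mid hmidge ih =>
    intro h0 hlohi hhi
    have hb := PySem.Int.floordiv_two_mid_bounds (le_of_lt h)
    have hmh : PySem.Int.floordiv (lo + hi) 2 < hi :=
      (PySem.Int.floordiv_lt_iff_lt_mul (by omega)).mpr (by omega)
    obtain ⟨i1, i2, i3, i4⟩ := ih h0 (by omega) (by omega)
    refine ⟨i1, by omega, i3, ?_⟩
    intro i hi1 hi2 hlt
    by_cases hc : i < mid
    · exact i4 i hi1 hc hlt
    · exact hmidge (lt_of_le_of_lt (sorted_pyGetD_mono a hs mid i (by omega) (by omega) (by omega)) hlt)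
  | case3 lo hi h =>
    intro _ hlohi _
    exact ⟨le_refl _, hlohi, fun i h1 h2 => by omega, fun i h1 h2 => by omega⟩

-- the prefix-sum list Source B builds, in structural form
def prefAux : List Int → Int → List Int
  | [], s => [s]
  | x :: xs, s => s :: prefAux xs (s + x)

theorem prefFold_eq :
    ∀ (xs : List Int) (p : List Int) (h : p ≠ []),
      xs.foldl (fun p x => p ++ [PySem.List.pyGetD p (-1) 0 + x]) p
        = p.dropLast ++ prefAux xs (p.getLast h) := by
  intro xs
  induction xs with
  | nil => intro p h; simp [prefAux, List.dropLast_append_getLast]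
  | cons x xs ih =>
    intro p h
    simp only [List.foldl_cons]
    rw [PySem.List.pyGetD_neg_one p 0 h,
        ih (p ++ [p.getLast h + x]) (by simp)]
    simp only [List.dropLast_concat, List.getLast_append_singleton, prefAux]
    rw [← List.singleton_append, ← List.append_assoc, List.dropLast_append_getLast h]

theorem prefAux_getD (xs : List Int) :
    ∀ (i : Nat) (s : Int), i ≤ xs.length → (prefAux xs s).getD i 0 = s + (xs.take i).sum := by
  induction xs with
  | nil =>
    intro i s h
    have hi0 : i = 0 := by simpa using h
    subst hi0; simp [prefAux]
  | cons x xs ih =>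
    intro i s h
    cases i with
    | zero => simp [prefAux]
    | succ i =>
      simp only [prefAux, List.getD_cons_succ, List.take_succ_cons, List.sum_cons]
      rw [ih i (s + x) (by simpa using h)]
      ring

-- sum over an index interval of (v - a[i]), in prefix-sum form
theorem sum_interval (a : List Int) (v : Int) :
    ∀ (d : Nat) (m j : Int), 0 ≤ m → j = m + d → j ≤ (a.length : Int) →
      ((PySem.List.pyRange m j 1).map (fun i => v - PySem.List.pyGetD a i 0)).sum
        = v * (j - m) - ((a.take j.toNat).sum - (a.take m.toNat).sum) := by
  intro d
  induction d with
  | zero =>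
    intro m j h0 hj _
    rw [show j = m by omega, PySem.List.pyRange_one_eq_nil (le_refl m)]
    simp
  | succ d ih =>
    intro m j h0 hj hlen
    rw [PySem.List.pyRange_one_cons (by omega : m < j)]
    simp only [List.map_cons, List.sum_cons]
    rw [ih (m + 1) j (by omega) (by omega) hlen]
    have hm : m.toNat < a.length := by omega
    rw [PySem.List.pyGetD_eq_getElem a 0 h0 (by omega)]
    have hsucc : (m + 1).toNat = m.toNat + 1 := by omega
    rw [hsucc, List.sum_take_succ a m.toNat hm]
    have hv : v * (j - m) = v * (j - (m + 1)) + v := by ring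
    rw [hv]; ring


-- cost of A's inner loop at the starting value is zero
theorem SolveCost_base (a : List Int) (m n L : Int)
    (h : ∀ i : Int, m ≤ i → i < n → ¬ PySem.List.pyGetD a i 0 < L) :
    SolveCost a m n L = 0 := by
  rw [SolveCost_eq_sum]
  apply List.sum_eq_zero
  intro x hx
  obtain ⟨i, hi, rfl⟩ := List.mem_map.mp hx
  rw [if_neg (h i (PySem.List.mem_pyRange_one.mp hi).1 (PySem.List.mem_pyRange_one.mp hi).2)]

-- A's while-loop returns the greatest candidate X whose cost fits in the budget
theorem SolveLoop_eq (a : List Int) (m n k X : Int)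
    (hPX : SolveCost a m n X ≤ k) :
    ∀ (low high res : Int),
      low ≤ X + 1 → X ≤ high → res ≤ X → (low = X + 1 → res = X) →
      (∀ v : Int, low ≤ v → v ≤ high → SolveCost a m n v ≤ k → v ≤ X) →
      SolveLoop a m n k low high res = X := by
  intro low high res
  fun_induction SolveLoop a m n k low high res with
  | case1 low high res h mid hc ih =>
    intro h1 h2 h3 h4 hw
    have hb := PySem.Int.floordiv_two_mid_bounds h
    have hmX : mid ≤ X := hw mid (by omega) (by omega) hc
    exact ih (by omega) h2 hmX (by omega) (fun v hv1 hv2 => hw v (by omega) hv2)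
  | case2 low high res h mid hc ih =>
    intro h1 h2 h3 h4 hw
    have hb := PySem.Int.floordiv_two_mid_bounds h
    have hXm : X < mid := by
      by_contra hcon
      exact hc (le_trans (SolveCost_mono a m n mid X (by omega)) hPX)
    exact ih h1 (by omega) h3 h4 (fun v hv1 hv2 => hw v hv1 (by omega))
  | case3 low high res h =>
    intro h1 h2 h3 h4 _
    exact h4 (by omega)

-- B's outer while-loop returns the same greatest feasible candidate
theorem SolveLoopB_eq (a pref : List Int) (m n k X : Int)
    (hPX : SolveCost a m n X ≤ k)
    (hBA : ∀ v : Int, SolveCostB a pref m n v = SolveCost a m n v) :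
    ∀ (lo hi : Int),
      lo ≤ X → X ≤ hi →
      (∀ v : Int, lo ≤ v → v ≤ hi → SolveCost a m n v ≤ k → v ≤ X) →
      SolveLoopB a pref m n k lo hi = X := by
  intro lo hi
  fun_induction SolveLoopB a pref m n k lo hi with
  | case1 lo hi h mid hc ih =>
    intro h1 h2 hw
    have hlo : lo + 1 ≤ mid := (PySem.Int.le_floordiv_iff_mul_le (by omega)).mpr (by omega)
    have hhi : mid < hi + 1 := (PySem.Int.floordiv_lt_iff_lt_mul (by omega)).mpr (by omega)
    rw [hBA] at hc
    have hmX : mid ≤ X := hw mid (by omega) (by omega) hc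
    exact ih hmX h2 (fun v hv1 hv2 => hw v (by omega) hv2)
  | case2 lo hi h mid hc ih =>
    intro h1 h2 hw
    have hlo : lo + 1 ≤ mid := (PySem.Int.le_floordiv_iff_mul_le (by omega)).mpr (by omega)
    have hhi : mid < hi + 1 := (PySem.Int.floordiv_lt_iff_lt_mul (by omega)).mpr (by omega)
    rw [hBA] at hc
    have hXm : X < mid := by
      by_contra hcon
      exact hc (le_trans (SolveCost_mono a m n mid X (by omega)) hPX)
    exact ih h1 (by omega) (fun v hv1 hv2 => hw v hv1 (by omega))
  | case3 lo hi h =>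
    intro h1 h2 _
    omega

-- when the suffix range [m, n) is empty both costs are 0
theorem SolveCostB_degenerate (a pref : List Int) (m n v : Int) (h : n ≤ m) :
    SolveCostB a pref m n v = SolveCost a m n v := by
  have hb : SolveBisect a v m n = m := by
    rw [SolveBisect, dif_neg (by omega : ¬ m < n)]
  simp only [SolveCostB, hb]
  rw [SolveCost_eq_sum, PySem.List.pyRange_one_eq_nil h]
  simp

-- main region: B's prefix-sum cost equals A's rescan cost
theorem SolveCostB_eq (a pref : List Int) (m n : Int)
    (hs : a.Pairwise (· ≤ ·))
    (hpref : pref = a.foldl (fun p x => p ++ [PySem.List.pyGetD p (-1) 0 + x]) [0])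
    (hm : 0 ≤ m) (hmn : m ≤ n) (hn : n ≤ (a.length : Int)) (v : Int) :
    SolveCostB a pref m n v = SolveCost a m n v := by
  obtain ⟨j1, j2, j3, j4⟩ := SolveBisect_spec a v hs m n hm hmn hn
  set j := SolveBisect a v m n with hj
  have hpc : pref = prefAux a 0 := by
    rw [hpref, prefFold_eq a [0] (by simp)]
    simp
  have hgd : ∀ i : Int, 0 ≤ i → i ≤ (a.length : Int) →
      PySem.List.pyGetD pref i 0 = (a.take i.toNat).sum := by
    intro i h0 hle
    rw [show i = ((i.toNat : Nat) : Int) by omega, PySem.List.pyGetD_natCast, hpc,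
        prefAux_getD a i.toNat 0 (by omega)]
    rw [show ((i.toNat : ℤ)).toNat = i.toNat from by omega]
    ring
  rw [SolveCost_eq_sum,
      PySem.List.pyRange_one_append m j n (by omega) (by omega),
      List.map_append, List.sum_append]
  have hfst : ((PySem.List.pyRange m j 1).map
      (fun i => if PySem.List.pyGetD a i 0 < v then v - PySem.List.pyGetD a i 0 else 0)).sum
      = ((PySem.List.pyRange m j 1).map (fun i => v - PySem.List.pyGetD a i 0)).sum := by
    congr 1
    apply List.map_congr_left
    intro i hi
    obtain ⟨hi1, hi2⟩ := PySem.List.mem_pyRange_one.mp hi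
    rw [if_pos (j3 i hi1 hi2)]
  have hsnd : ((PySem.List.pyRange j n 1).map
      (fun i => if PySem.List.pyGetD a i 0 < v then v - PySem.List.pyGetD a i 0 else 0)).sum = 0 := by
    apply List.sum_eq_zero
    intro x hx
    obtain ⟨i, hi, rfl⟩ := List.mem_map.mp hx
    obtain ⟨hi1, hi2⟩ := PySem.List.mem_pyRange_one.mp hi
    rw [if_neg (j4 i hi1 hi2)]
  rw [hfst, hsnd, sum_interval a v (j - m).toNat m j hm (by omega) (by omega)]
  simp only [SolveCostB, ← hj]
  rw [hgd j (by omega) (by omega), hgd m hm (by omega)]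
  ring

-- ===== VERDICT (by name: the statement is the Claim_ definition above) =====
theorem Solve_spec : Claim_equal_Solve := by
  intro n k arr _ hpre
  obtain ⟨hp1, hp2, hp3⟩ := hpre
  simp only [Spec_Solve, Solve, Solve_alt]
  set a := PySem.List.sorted arr (fun x => x) false with ha
  set m := PySem.Int.floordiv n 2 with hm
  set L := PySem.List.pyGetD a m 0 with hL
  set pref := a.foldl (fun p x => p ++ [PySem.List.pyGetD p (-1) 0 + x]) [0] with hpref
  have hlen : (a.length : Int) = (arr.length : Int) := by
    rw [ha, PySem.List.length_sorted]
  have hs : a.Pairwise (· ≤ ·) := by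
    have := PySem.List.sorted_pairwise arr (fun x => x)
    simpa [ha] using this
  by_cases hk : k < 0
  · rw [SolveLoop, SolveLoopB, dif_neg (by omega : ¬ L ≤ L + k),
        dif_neg (by omega : ¬ L < L + k)]
  · have hdm := PySem.Int.floordiv_mul_add_mod n 2
    have hr := PySem.Int.mod_two_eq n
    rw [← hm] at hdm
    have hBA : ∀ v : Int, SolveCostB a pref m n v = SolveCost a m n v := by
      intro v
      by_cases hnm : n ≤ m
      · exact SolveCostB_degenerate a pref m n v hnm
      · exact SolveCostB_eq a pref m n hs hpref (by omega) (by omega) (by omega) v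
    have hbase : SolveCost a m n L = 0 := by
      apply SolveCost_base
      intro i h1 h2
      have h0m : 0 ≤ m := by omega
      have := sorted_pyGetD_mono a hs m i h0m h1 (by omega)
      rw [← hL] at this
      omega
    set S := (Finset.range (k.toNat + 1)).filter
      (fun t : ℕ => SolveCost a m n (L + (t : ℤ)) ≤ k) with hS
    have h0S : 0 ∈ S := by
      rw [hS]
      refine Finset.mem_filter.mpr ⟨Finset.mem_range.mpr (by omega), ?_⟩
      have hc0 : SolveCost a m n (L + ((0 : ℕ) : ℤ)) = 0 := by norm_num [hbase]
      rw [hc0]; omega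
    set Xn := S.max' ⟨0, h0S⟩ with hXn
    have hXS : Xn ∈ S := Finset.max'_mem S ⟨0, h0S⟩
    rw [hS] at hXS
    obtain ⟨hXr, hXc⟩ := Finset.mem_filter.mp hXS
    have hXr' : (Xn : Int) ≤ k := by
      have := Finset.mem_range.mp hXr
      omega
    set X := L + (Xn : Int) with hX
    have hXpos : (0 : ℤ) ≤ (Xn : ℤ) := Int.natCast_nonneg _
    have hwin : ∀ v : Int, L ≤ v → v ≤ L + k → SolveCost a m n v ≤ k → v ≤ X := by
      intro v h1 h2 h3
      have hmem : (v - L).toNat ∈ S := by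
        rw [hS]
        refine Finset.mem_filter.mpr ⟨Finset.mem_range.mpr (by omega), ?_⟩
        rw [show L + ((v - L).toNat : ℤ) = v by omega]
        exact h3
      have := Finset.le_max' S _ hmem
      omega
    have hPX : SolveCost a m n X ≤ k := hXc
    rw [SolveLoop_eq a m n k X hPX L (L + k) L (by omega) (by omega) (by omega)
          (fun h => by omega) (fun v h1 h2 => hwin v h1 h2),
        SolveLoopB_eq a pref m n k X hPX hBA L (L + k) (by omega) (by omega)
          (fun v h1 h2 => hwin v h1 h2)]
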